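-- pv_equiv track=rewrite | github.com/DeepBlockDeepak/python38_practice | DailyCodingQ/string_delimeter_reverser_2.py | string_reverser2
-- ===== SOURCE A (Python) =====
-- def string_reverser2(input_string):
--
--     d_list = []     #holds delim_string elements
--     w_list = []     #holds word_string elements
--
--     delim_string = ''   #container for consecutive delimeters, encountered in the input_string
--     word_string = ''    #container for consecutively encountered non-delimeters, encountered in input_string
--
--     set_of_delimeters = ["/", ";", ":", "//", "\\", "-"]    #list of possible delimeters
--
--     for char in input_string:
--         """
--         loop over each char of the input string.
--         Logic will be broken into consecutively encountered delimeters and consecutively encountered non-delimeters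
--         """
--
--         if char in set_of_delimeters:   #delimeter encountered
--             if delim_string == '':      #when the current char is the first delimeter of the current pass
--                 w_list.append(word_string)  #because the current char is the first delimeter of the new interval,
--                 word_string = ''            #that means we finished processing all the 'word' chars of the previous interval.
--                                             #Append the word_string to the word_list and reset word_string for the next batch.
--
--             delim_string = delim_string + char  #add the delimeter to the delim_string
--
--         else:   #non-delimeter encountered
--             if word_string == '':       #when the current char is the first non-delimeter of the current pass
--                 d_list.append(delim_string)
--                 delim_string = ''
--             word_string = word_string + char
--
--     #Catch any leftover delimeters or words... This will occur for whomever comprises the last interval of the input_string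
--     if delim_string != '':  #when a delimeter is the last interval
--         d_list.append(delim_string)
--     if word_string != '':
--         w_list.append(word_string)
--
--     w_list.reverse()    #necessary reversal of the words_list
--
--     final = ''          #final string to contain the correctly ordered result of delimeters and words
--
--     """
--     Words_list and Delimter_list will often not be the same length.
--     It is necessary to loop over the range of the longest length, ignoring when an out-of-bounds loop is
--     encountered in the shorter list by appending a blank string element to the appropriate string
--     """
--     for i in range(max(len(w_list), len(d_list))):
--
--         word_string = w_list[i] if i < len(w_list) else ''
--
--         delim_string = d_list[i] if i < len(d_list) else ''
--
--         final += delim_string + word_string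
--
--
--     return final
-- ===== SOURCE B (Python) =====
-- def string_reverser2(input_string):
--     DELIMS = "/;:\\-"
--     tokens = []  # maximal alternating runs as [chars, is_delim]
--     for ch in input_string:
--         is_d = ch in DELIMS
--         if tokens and tokens[-1][1] == is_d:
--             tokens[-1][0].append(ch)
--         else:
--             tokens.append([[ch], is_d])
--     words = [run for run, is_d in tokens if not is_d]
--     out = []
--     for run, is_d in tokens:
--         out.append(run if is_d else words.pop())
--     return ''.join(''.join(run) for run in out)
-- ===== Notes on version B (the rewrite author's own statement) =====
-- stated objective: simpler
-- what changed: A maintains two parallel run lists plus two run accumulators and reassembles by a blank-padded index loop over the longer list; B tokenizes the string into one alternating list of tagged runs and rebuilds it in a single walk, popping reversed words into the word slots.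
import Mathlib
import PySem

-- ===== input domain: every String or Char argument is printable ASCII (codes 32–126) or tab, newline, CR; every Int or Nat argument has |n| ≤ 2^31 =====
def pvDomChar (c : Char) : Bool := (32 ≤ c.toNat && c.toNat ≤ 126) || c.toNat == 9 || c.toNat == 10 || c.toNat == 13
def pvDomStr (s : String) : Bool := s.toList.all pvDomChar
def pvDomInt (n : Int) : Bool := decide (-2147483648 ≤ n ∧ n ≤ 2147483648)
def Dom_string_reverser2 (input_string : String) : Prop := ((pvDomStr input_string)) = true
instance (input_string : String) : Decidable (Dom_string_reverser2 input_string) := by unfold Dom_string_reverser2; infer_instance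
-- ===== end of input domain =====

-- B replaces A's two parallel run lists, four accumulators and padded max-index interleave by a
-- single alternating token list rebuilt in one walk, popping reversed words into the word slots
-- (objective: simpler; equal return value proved for every input).

-- ===== PORT A =====
-- 'char in ["/", ";", ":", "//", "\\", "-"]': char is a 1-character string, so the "//" entry
-- can never match; the test is exactly membership of the character among these 5 characters.
def pvIsDelimA (c : Char) : Bool := c ∈ ['/', ';', ':', '\\', '-']

-- the loop body over one character; state = (d_list, w_list, delim_string, word_string)
def pvStepA (st : List (List Char) × List (List Char) × List Char × List Char) (c : Char) :
    List (List Char) × List (List Char) × List Char × List Char :=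
  let (dl, wl, ds, ws) := st
  if pvIsDelimA c then
    let (wl, ws) := if ds = [] then (wl ++ [ws], ([] : List Char)) else (wl, ws)
    (dl, wl, ds ++ [c], ws)
  else
    let (dl, ds) := if ws = [] then (dl ++ [ds], ([] : List Char)) else (dl, ds)
    (dl, wl, ds, ws ++ [c])

def string_reverser2 (input_string : String) : String :=
  let st := input_string.toList.foldl pvStepA ([], [], [], [])
  let dl := st.1
  let wl := st.2.1
  let ds := st.2.2.1
  let ws := st.2.2.2
  let dl := if ds ≠ [] then dl ++ [ds] else dl      -- if delim_string != ''
  let wl := if ws ≠ [] then wl ++ [ws] else wl      -- if word_string != ''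
  let wl := wl.reverse                              -- w_list.reverse()
  -- for i in range(max(len(w_list), len(d_list))): final += d[i]-or-'' + w[i]-or-''
  let final := (PySem.List.pyRange 0 (max wl.length dl.length : Nat) 1).foldl
    (fun acc i =>
      let word_string := if i < (wl.length : Int) then PySem.List.pyGetD wl i [] else []
      let delim_string := if i < (dl.length : Int) then PySem.List.pyGetD dl i [] else []
      acc ++ (delim_string ++ word_string)) []
  String.mk final

-- ===== PORT B =====
-- 'ch in "/;:\\-"': single-character membership in the delimiter string
def pvIsDelimB (c : Char) : Bool := "/;:\\-".toList.contains c

-- one step of B's tokenizing loop: extend the last run if same class, else start a new token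
def pvTokStep (T : List (List Char × Bool)) (c : Char) : List (List Char × Bool) :=
  let b := pvIsDelimB c
  match T.getLast? with
  | some t => if t.2 = b then T.dropLast ++ [(t.1 ++ [c], b)] else T ++ [([c], b)]
  | none => T ++ [([c], b)]

def string_reverser2_alt (input_string : String) : String :=
  let tokens := input_string.toList.foldl pvTokStep []
  let words := tokens.filterMap (fun t => if t.2 then none else some t.1)
  let out := tokens.foldl
    (fun (st : List (List Char) × List (List Char)) t =>
      if t.2 then (st.1, st.2 ++ [t.1])
      else
        match st.1.getLast? with   -- words.pop(); the none arm is Python's unreachable IndexError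
        | some w => (st.1.dropLast, st.2 ++ [w])
        | none => (st.1, st.2 ++ [[]]))
    (words, [])
  String.mk out.2.flatten

-- ===== PRECONDITION & SPEC =====
def Spec_string_reverser2 (input_string : String) (out : String) : Prop := out = string_reverser2_alt input_string
instance (input_string : String) (out : String) : Decidable (Spec_string_reverser2 input_string out) := by unfold Spec_string_reverser2; infer_instance

-- ===== CLAIM (what is proved, stated in full; the proofs are below) =====
def Claim_equal_string_reverser2 : Prop := ∀ (input_string : String), Dom_string_reverser2 input_string → Spec_string_reverser2 input_string (string_reverser2 input_string)

-- ===== LEMMAS AND PROOFS =====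

def pvDelims (T : List (List Char × Bool)) : List (List Char) :=
  T.filterMap (fun t => if t.2 then some t.1 else none)
def pvWords (T : List (List Char × Bool)) : List (List Char) :=
  T.filterMap (fun t => if t.2 then none else some t.1)
def pvDs (T : List (List Char × Bool)) : List Char :=
  match T.getLast? with | some (r, true) => r | _ => []
def pvWs (T : List (List Char × Bool)) : List Char :=
  match T.getLast? with | some (r, false) => r | _ => []
def pvDpad (T : List (List Char × Bool)) : List (List Char) :=
  match T.head? with | some (_, false) => [[]] | _ => []
def pvWpad (T : List (List Char × Bool)) : List (List Char) :=
  match T.head? with | some (_, true) => [[]] | _ => []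
def pvDl (T : List (List Char × Bool)) : List (List Char) :=
  pvDpad T ++ pvDelims (match T.getLast? with | some (_, true) => T.dropLast | _ => T)
def pvWl (T : List (List Char × Bool)) : List (List Char) :=
  pvWpad T ++ pvWords (match T.getLast? with | some (_, false) => T.dropLast | _ => T)
def pvSt (T : List (List Char × Bool)) : List (List Char) × List (List Char) × List Char × List Char :=
  (pvDl T, pvWl T, pvDs T, pvWs T)
def pvInv (T : List (List Char × Bool)) : Prop :=
  (∀ t ∈ T, t.1 ≠ []) ∧ T.IsChain (fun a b => a.2 ≠ b.2)
theorem pvDelimEq (c : Char) : pvIsDelimA c = pvIsDelimB c := by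
  simp [pvIsDelimA, pvIsDelimB]
theorem tok_nil (c : Char) : pvTokStep [] c = [([c], pvIsDelimB c)] := rfl
theorem tok_concat (I : List (List Char × Bool)) (t : List Char × Bool) (c : Char) :
    pvTokStep (I ++ [t]) c =
      (if t.2 = pvIsDelimB c then I ++ [(t.1 ++ [c], pvIsDelimB c)]
       else (I ++ [t]) ++ [([c], pvIsDelimB c)]) := by
  rw [pvTokStep]; simp only [List.getLast?_concat, List.dropLast_concat]


def pvPadB : Option Bool → List (List Char)
  | some false => [[]] | _ => []
def pvPadW : Option Bool → List (List Char)
  | some true => [[]] | _ => []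

theorem pvDpad_eq (T : List (List Char × Bool)) : pvDpad T = pvPadB (T.head?.map Prod.snd) := by
  rcases T with _ | ⟨⟨r, b⟩, T⟩ <;> first | rfl | (cases b <;> rfl)
theorem pvWpad_eq (T : List (List Char × Bool)) : pvWpad T = pvPadW (T.head?.map Prod.snd) := by
  rcases T with _ | ⟨⟨r, b⟩, T⟩ <;> first | rfl | (cases b <;> rfl)
theorem headsnd_concat (I : List (List Char × Bool)) (t : List Char × Bool) :
    ((I ++ [t]).head?.map Prod.snd) = (I.head?.map Prod.snd).or (some t.2) := by
  rw [List.head?_append]; cases I.head? <;> rfl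

theorem pvStep_eq (T : List (List Char × Bool)) (c : Char) (h : pvInv T) :
    pvStepA (pvSt T) c = pvSt (pvTokStep T c) := by
  obtain ⟨hne, -⟩ := h
  rcases List.eq_nil_or_concat T with rfl | ⟨I, ⟨r, db⟩, rfl⟩
  all_goals try simp only [List.concat_eq_append] at *
  · cases hb : pvIsDelimB c <;>
      simp [pvStepA, pvSt, pvDl, pvWl, pvDs, pvWs, pvDpad, pvWpad, pvDelims, pvWords,
        tok_nil, pvDelimEq, hb]
  · have hr : r ≠ [] := by
      have := hne (r, db) (by simp); simpa using this
    rw [tok_concat]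
    cases hb : pvIsDelimB c <;> cases db <;>
      simp [pvStepA, pvSt, pvDl, pvWl, pvDs, pvWs, pvDpad_eq, pvWpad_eq, headsnd_concat,
        pvDelims, pvWords, pvDelimEq, hb, hr, List.getLast?_concat, List.dropLast_concat,
        List.filterMap_append, Option.or_assoc, Option.some_or] <;>
      (cases I.head? <;> simp [pvPadB, pvPadW])

theorem pvInv_step (T : List (List Char × Bool)) (c : Char) (h : pvInv T) :
    pvInv (pvTokStep T c) := by
  obtain ⟨hne, hch⟩ := h
  rcases List.eq_nil_or_concat T with rfl | ⟨I, t, rfl⟩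
  all_goals try simp only [List.concat_eq_append] at *
  · exact ⟨by simp [tok_nil], by simp [tok_nil]⟩
  · rw [tok_concat]
    rw [List.isChain_append] at hch
    obtain ⟨hcI, -, hrel⟩ := hch
    by_cases hb : t.2 = pvIsDelimB c
    · rw [if_pos hb]
      refine ⟨?_, ?_⟩
      · intro u hu
        rcases List.mem_append.1 hu with h1 | h2
        · exact hne u (List.mem_append_left _ h1)
        · simp only [List.mem_singleton] at h2; subst h2; simp
      · rw [List.isChain_append]
        refine ⟨hcI, by simp, ?_⟩
        intro x hx y hy
        simp only [List.head?_cons, Option.mem_def, Option.some.injEq] at hy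
        subst hy
        have := hrel x hx t (by simp)
        simpa [← hb] using this
    · rw [if_neg hb]
      refine ⟨?_, ?_⟩
      · intro u hu
        rcases List.mem_append.1 hu with h1 | h2
        · exact hne u h1
        · simp only [List.mem_singleton] at h2; subst h2; simp
      · rw [List.isChain_append]
        refine ⟨List.isChain_append.2 ⟨hcI, by simp, hrel⟩, by simp, ?_⟩
        intro x hx y hy
        simp only [List.head?_cons, Option.mem_def, Option.some.injEq] at hy
        subst hy
        simp only [List.getLast?_concat, Option.mem_def, Option.some.injEq] at hx
        subst hx
        simpa using hb

theorem pvInv_fold (cs : List Char) (T : List (List Char × Bool)) (h : pvInv T) :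
    pvInv (cs.foldl pvTokStep T) := by
  induction cs generalizing T with
  | nil => exact h
  | cons c cs ih => exact ih _ (pvInv_step T c h)

theorem pvFold_eq (cs : List Char) (T : List (List Char × Bool)) (h : pvInv T) :
    cs.foldl pvStepA (pvSt T) = pvSt (cs.foldl pvTokStep T) := by
  induction cs generalizing T with
  | nil => rfl
  | cons c cs ih =>
      simp only [List.foldl_cons, pvStep_eq T c h]
      exact ih _ (pvInv_step T c h)

theorem pvClose_d (T : List (List Char × Bool)) (h : pvInv T) :
    (if pvDs T ≠ [] then pvDl T ++ [pvDs T] else pvDl T) = pvDpad T ++ pvDelims T := by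
  obtain ⟨hne, -⟩ := h
  rcases List.eq_nil_or_concat T with rfl | ⟨I, ⟨r, db⟩, rfl⟩
  all_goals try simp only [List.concat_eq_append] at *
  · rfl
  · have hr : r ≠ [] := by have := hne (r, db) (by simp); simpa using this
    cases db <;>
      simp [pvDs, pvDl, pvDelims, hr, List.getLast?_concat, List.dropLast_concat,
        List.filterMap_append]

theorem pvClose_w (T : List (List Char × Bool)) (h : pvInv T) :
    (if pvWs T ≠ [] then pvWl T ++ [pvWs T] else pvWl T) = pvWpad T ++ pvWords T := by
  obtain ⟨hne, -⟩ := h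
  rcases List.eq_nil_or_concat T with rfl | ⟨I, ⟨r, db⟩, rfl⟩
  all_goals try simp only [List.concat_eq_append] at *
  · rfl
  · have hr : r ≠ [] := by have := hne (r, db) (by simp); simpa using this
    cases db <;>
      simp [pvWs, pvWl, pvWords, hr, List.getLast?_concat, List.dropLast_concat,
        List.filterMap_append]

def pvZp : List (List Char) → List (List Char) → List Char
  | [], [] => []
  | d :: dt, [] => d ++ pvZp dt []
  | [], w :: wt => w ++ pvZp [] wt
  | d :: dt, w :: wt => d ++ w ++ pvZp dt wt

theorem pvZp_pad (D W : List (List Char)) : pvZp D (W ++ [[]]) = pvZp D W := by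
  induction D generalizing W with
  | nil =>
      induction W with
      | nil => simp [pvZp]
      | cons w wt ih => simp only [List.cons_append, pvZp, ih]
  | cons d dt ih =>
      cases W with
      | nil => simp [pvZp, ih []]
      | cons w wt => simp only [List.cons_append, pvZp, ih wt]

theorem pvGuard_getD (xs : List (List Char)) (k : Nat) :
    (if (k : Int) < (xs.length : Int) then PySem.List.pyGetD xs (k : Int) [] else []) = xs.getD k [] := by
  rw [PySem.List.pyGetD_natCast]
  split_ifs with h
  · rfl
  · rw [List.getD_eq_default]
    omega

theorem pvRangeShift (n : Nat) (f : Nat → List Char) :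
    (List.range (n + 1)).flatMap f = f 0 ++ (List.range n).flatMap (fun k => f (k + 1)) := by
  rw [List.range_succ_eq_map]
  simp [List.flatMap_map, Nat.succ_eq_add_one, Nat.add_comm]

theorem pvZpFlat (D W : List (List Char)) :
    (List.range (max W.length D.length)).flatMap (fun k => D.getD k [] ++ W.getD k []) = pvZp D W := by
  induction D generalizing W with
  | nil =>
      induction W with
      | nil => simp [pvZp]
      | cons w wt ih =>
          simp only [List.length_cons, List.length_nil, Nat.max_eq_left (Nat.zero_le _),
            Nat.zero_max] at *
          rw [pvRangeShift]
          simp only [List.getD_cons_zero, List.getD_cons_succ, List.getD_nil] at *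
          simp only [List.nil_append] at *
          rw [ih]
          simp [pvZp]
  | cons d dt ih =>
      cases W with
      | nil =>
          simp only [List.length_cons, List.length_nil, Nat.zero_max]
          rw [pvRangeShift]
          simp only [List.getD_cons_zero, List.getD_cons_succ, List.getD_nil]
          have := ih []
          simp only [List.length_nil, Nat.zero_max, List.getD_nil, List.append_nil] at this ⊢
          rw [this]
          simp [pvZp]
      | cons w wt =>
          simp only [List.length_cons, Nat.succ_max_succ]
          rw [pvRangeShift]
          simp only [List.getD_cons_zero, List.getD_cons_succ]
          rw [ih wt]
          simp [pvZp]

theorem pvLoop_eq_zp (D W : List (List Char)) :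
    (PySem.List.pyRange 0 (max W.length D.length : Nat) 1).foldl
      (fun acc i => acc ++
        ((if i < (D.length : Int) then PySem.List.pyGetD D i [] else []) ++
         (if i < (W.length : Int) then PySem.List.pyGetD W i [] else []))) [] = pvZp D W := by
  rw [PySem.List.foldl_append_eq_flatMap, PySem.List.pyRange_one]
  simp only [Int.sub_zero, Int.toNat_natCast, List.flatMap_map, List.nil_append, Int.zero_add]
  simp only [pvGuard_getD]
  exact pvZpFlat D W

def pvWalk : List (List Char × Bool) → List (List Char) → List Char
  | [], _ => []
  | (r, true) :: T, Q => r ++ pvWalk T Q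
  | (_, false) :: T, Q => Q.headD [] ++ pvWalk T Q.tail

theorem pvFoldB_eq_walk (T : List (List Char × Bool)) (P : List (List Char))
    (acc : List (List Char)) :
    (T.foldl (fun (st : List (List Char) × List (List Char)) t =>
      if t.2 then (st.1, st.2 ++ [t.1])
      else
        match st.1.getLast? with
        | some w => (st.1.dropLast, st.2 ++ [w])
        | none => (st.1, st.2 ++ [[]])) (P, acc)).2.flatten
      = acc.flatten ++ pvWalk T P.reverse := by
  induction T generalizing P acc with
  | nil => simp [pvWalk]
  | cons t T ih =>
      rcases t with ⟨r, b⟩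
      cases b
      · rcases List.eq_nil_or_concat P with rfl | ⟨P', w, rfl⟩
        · simp only [List.foldl_cons, List.getLast?_nil]
          rw [ih]
          simp [pvWalk]
        · simp only [List.concat_eq_append, List.foldl_cons, List.getLast?_concat,
            List.dropLast_concat]
          rw [ih]
          simp [pvWalk]
      · simp only [List.foldl_cons, if_pos rfl]
        rw [ih]
        simp [pvWalk]



theorem pvDelims_cons_word (r : List Char) (T : List (List Char × Bool)) :
    pvDelims ((r, false) :: T) = pvDelims T := by simp [pvDelims]
theorem pvDelims_cons_delim (r : List Char) (T : List (List Char × Bool)) :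
    pvDelims ((r, true) :: T) = r :: pvDelims T := by simp [pvDelims]
theorem pvWords_cons_word (r : List Char) (T : List (List Char × Bool)) :
    pvWords ((r, false) :: T) = r :: pvWords T := by simp [pvWords]
theorem pvWords_cons_delim (r : List Char) (T : List (List Char × Bool)) :
    pvWords ((r, true) :: T) = pvWords T := by simp [pvWords]

theorem pvMain (T : List (List Char × Bool)) (hc : T.IsChain (fun a b => a.2 ≠ b.2))
    (Q : List (List Char)) (hq : Q.length = (pvWords T).length) :
    (match T.head? with
     | none => ([] : List Char)
     | some (_, false) => pvZp ([] :: pvDelims T) Q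
     | some (_, true) => pvZp (pvDelims T) (Q ++ [[]])) = pvWalk T Q := by
  induction T generalizing Q with
  | nil => simp [pvWalk]
  | cons t T ih =>
      rcases t with ⟨r, b⟩
      have hcT : T.IsChain (fun a b => a.2 ≠ b.2) := hc.tail
      cases b
      · -- word-first token
        rcases Q with _ | ⟨q, qt⟩
        · exfalso
          simp [pvWords_cons_word] at hq
        · have hq' : qt.length = (pvWords T).length := by
            simp only [pvWords_cons_word, List.length_cons] at hq
            omega
          have inner : pvZp (pvDelims T) qt = pvWalk T qt := by
            rcases T with _ | ⟨⟨r2, b2⟩, T'⟩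
            · have : qt = [] := by
                simpa [pvWords] using List.length_eq_zero_iff.1 (by simpa [pvWords] using hq')
              subst this
              simp [pvZp, pvDelims, pvWalk]
            · have hb2 : b2 = true := by
                have := List.IsChain.rel hc
                simpa using this
              subst hb2
              have := ih hcT qt hq'
              simp only [List.head?_cons] at this
              rw [← this, pvZp_pad]
          simp only [List.head?_cons, pvDelims_cons_word]
          rw [show pvZp ([] :: pvDelims T) (q :: qt) = [] ++ q ++ pvZp (pvDelims T) qt by
                simp [pvZp]]
          rw [pvWalk, inner]
          simp
      · -- delimiter-first token
        simp only [List.head?_cons, pvDelims_cons_delim]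
        rcases Q with _ | ⟨q, qt⟩
        · -- no words at all
          rcases T with _ | ⟨⟨r2, b2⟩, T'⟩
          · simp [pvZp, pvWalk, pvDelims]
          · have hb2 : b2 = false := by
              have := List.IsChain.rel hc
              simpa using this
            subst hb2
            exfalso
            simp [pvWords_cons_delim, pvWords_cons_word] at hq
        · rcases T with _ | ⟨⟨r2, b2⟩, T'⟩
          · exfalso
            simp [pvWords_cons_delim, pvWords] at hq
          · have hb2 : b2 = false := by
              have := List.IsChain.rel hc
              simpa using this
            subst hb2
            have hq2 : (q :: qt).length = (pvWords ((r2, false) :: T')).length := by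
              simpa [pvWords_cons_delim] using hq
            have := ih hcT (q :: qt) hq2
            simp only [List.head?_cons] at this
            rw [show pvWalk ((r, true) :: (r2, false) :: T') (q :: qt)
                  = r ++ pvWalk ((r2, false) :: T') (q :: qt) from rfl, ← this]
            simp only [List.cons_append, pvZp, pvZp_pad, List.nil_append, List.append_assoc]

theorem pv_final (s : String) : string_reverser2 s = string_reverser2_alt s := by
  unfold string_reverser2 string_reverser2_alt
  have hinv0 : pvInv ([] : List (List Char × Bool)) := ⟨by simp, by simp⟩
  have hinv : pvInv (s.toList.foldl pvTokStep []) := pvInv_fold s.toList [] hinv0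
  have hst : s.toList.foldl pvStepA ([], [], [], []) = pvSt (s.toList.foldl pvTokStep []) :=
    pvFold_eq s.toList [] hinv0
  rw [hst]
  set Tk := s.toList.foldl pvTokStep [] with hTk
  simp only [pvSt]
  rw [pvClose_d Tk hinv, pvClose_w Tk hinv]
  rw [pvLoop_eq_zp]
  rw [pvFoldB_eq_walk]
  rw [show Tk.filterMap (fun t => if t.2 = true then none else some t.1) = pvWords Tk from rfl]
  rw [List.reverse_append]
  have hq : (pvWords Tk).reverse.length = (pvWords Tk).length := by simp
  have hmain := pvMain Tk hinv.2 (pvWords Tk).reverse hq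
  rcases Tk with _ | ⟨⟨r, b⟩, Tk'⟩
  · simp [pvWpad, pvDpad, pvDelims, pvWords, pvZp, pvWalk]
  · cases b
    · simp only [pvWpad, pvDpad, List.head?_cons] at hmain ⊢
      simp only [List.reverse_nil, List.append_nil, List.nil_append] at hmain ⊢
      rw [← hmain]
      rfl
    · simp only [pvWpad, pvDpad, List.head?_cons] at hmain ⊢
      simp only [List.reverse_cons, List.reverse_nil, List.nil_append] at hmain ⊢
      rw [← hmain]
      rfl

-- ===== VERDICT (by name: the statement is the Claim_ definition above) =====
theorem string_reverser2_spec : Claim_equal_string_reverser2 := by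
  intro s _
  unfold Spec_string_reverser2
  exact pv_final s
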